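-- pv_equiv track=rewrite | github.com/Pveen3113/Encrypt-and-Decrypt-using-matrix-modulo27 | Main.py | mulinv
-- ===== SOURCE A (Python) =====
-- def mulinv(key):
--
--     size = len(key)
--
--     if size == 2:
--         deter = key[0][0] * key[1][1] - key[0][1] * key[1][0]
--     elif size == 3:
--         deter = (key[0][0]) * ((key[1][1] * key[2][2]) - (key[2][1] * key[1][2])) - ((key[0][1]) * ((key[1][0] * key[2][2]) - (key[2][0] * key[1][2]))) + ((key[0][2]) * ((key[1][0] * key[2][1]) - (key[2][0] * key[1][1])))
--     elif size == 4:
--         deter1 = key[1][1] * ((key[2][2] * key[3][3]) - (key[3][2] * key[2][3])) - key[1][2] * ((key[2][1] * key[3][3]) - (key[3][1] * key[2][3])) + key[1][3] * ((key[2][1] * key[3][2]) - (key[3][1] * key[2][2]))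
--         deter2 = key[1][0] * ((key[2][2] * key[3][3]) - (key[3][2] * key[2][3])) - key[1][2] * ((key[2][0] * key[3][3]) - (key[3][0] * key[2][3])) + key[1][3] * ((key[2][0] * key[3][2]) - (key[3][0] * key[2][2]))
--         deter3 = key[1][0] * ((key[2][1] * key[3][3]) - (key[3][1] * key[2][3])) - key[1][1] * ((key[2][0] * key[3][3]) - (key[3][0] * key[2][3])) + key[1][3] * ((key[2][0] * key[3][1]) - (key[3][0] * key[2][1]))
--         deter4 = key[1][0] * ((key[2][1] * key[3][2]) - (key[3][1] * key[2][2])) - key[1][1] * ((key[2][0] * key[3][2]) - (key[3][0] * key[2][2])) + key[1][2] * ((key[2][0] * key[3][1]) - (key[3][0] * key[2][1]))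
--         deter = key[0][0] * deter1 - key[0][1] * deter2 + key[0][2] * deter3 - key[0][3] * deter4
--
--     inv = -1
--
--     for i in range(27):
--         temp_inv = deter * i
--         if temp_inv % 27 == 1:
--             inv = i
--             break
--         else:
--             continue
--
--     return inv
-- ===== SOURCE B (Python) =====
-- def mulinv(key):
--     def det(m, n):
--         # Laplace expansion along the first row; works for any n >= 0
--         if n == 0:
--             return 0
--         if n == 1:
--             return m[0][0]
--         return sum((-1) ** j * m[0][j] * det([row[:j] + row[j + 1:] for row in m[1:]], n - 1)
--                    for j in range(n))
--
--     def egcd(a, b):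
--         if a == 0:
--             return b, 0, 1
--         g, x, y = egcd(b % a, a)
--         return g, y - (b // a) * x, x
--
--     d = det(key, len(key)) % 27
--     g, x, _ = egcd(d, 27)
--     return x % 27 if g == 1 else -1
-- ===== Notes on version B (the rewrite author's own statement) =====
-- stated objective: alternative
-- what changed: B replaces A's three hard-coded 2x2/3x3/4x4 determinant formulas by one recursive first-row Laplace expansion and A's scan of i in range(27) for deter*i % 27 == 1 by the extended Euclidean algorithm (g, x, y = egcd(d % 27, 27), answer x % 27 when g == 1, else -1).
import Mathlib
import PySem

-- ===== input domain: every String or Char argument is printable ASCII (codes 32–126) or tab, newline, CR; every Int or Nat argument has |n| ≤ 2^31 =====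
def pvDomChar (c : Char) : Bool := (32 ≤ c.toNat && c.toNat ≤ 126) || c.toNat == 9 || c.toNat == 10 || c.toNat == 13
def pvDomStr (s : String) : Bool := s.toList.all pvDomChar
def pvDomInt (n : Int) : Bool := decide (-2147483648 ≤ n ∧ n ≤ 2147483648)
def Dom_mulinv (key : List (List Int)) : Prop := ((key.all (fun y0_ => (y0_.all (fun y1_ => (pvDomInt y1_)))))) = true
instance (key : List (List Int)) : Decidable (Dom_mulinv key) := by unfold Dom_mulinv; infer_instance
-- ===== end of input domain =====

-- B replaces A's hard-coded 2/3/4 determinant formulas and 0..26 inverse scan by a recursive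
-- Laplace expansion and the extended Euclidean algorithm (alternative decomposition, same cost).

-- ===== PORT A =====
-- key[i][j]; in range under Pre_
def pvKeyGet (key : List (List Int)) (i j : Int) : Int :=
  ((PySem.List.pyGet? ((PySem.List.pyGet? key i).getD []) j).getD 0)

-- A's `for i in range(27): if deter*i % 27 == 1: inv = i; break`
def pvMulinvLoop (deter : Int) : List Int → Int
  | [] => -1
  | i :: rest => if PySem.Int.mod (deter * i) 27 = 1 then i else pvMulinvLoop deter rest

def mulinv (key : List (List Int)) : Int :=
  let size : Int := (key.length : Int)
  let k := pvKeyGet key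
  let deter : Int :=
    if size = 2 then k 0 0 * k 1 1 - k 0 1 * k 1 0
    else if size = 3 then
      k 0 0 * (k 1 1 * k 2 2 - k 2 1 * k 1 2) - k 0 1 * (k 1 0 * k 2 2 - k 2 0 * k 1 2)
        + k 0 2 * (k 1 0 * k 2 1 - k 2 0 * k 1 1)
    else if size = 4 then
      let deter1 := k 1 1 * (k 2 2 * k 3 3 - k 3 2 * k 2 3) - k 1 2 * (k 2 1 * k 3 3 - k 3 1 * k 2 3) + k 1 3 * (k 2 1 * k 3 2 - k 3 1 * k 2 2)
      let deter2 := k 1 0 * (k 2 2 * k 3 3 - k 3 2 * k 2 3) - k 1 2 * (k 2 0 * k 3 3 - k 3 0 * k 2 3) + k 1 3 * (k 2 0 * k 3 2 - k 3 0 * k 2 2)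
      let deter3 := k 1 0 * (k 2 1 * k 3 3 - k 3 1 * k 2 3) - k 1 1 * (k 2 0 * k 3 3 - k 3 0 * k 2 3) + k 1 3 * (k 2 0 * k 3 1 - k 3 0 * k 2 1)
      let deter4 := k 1 0 * (k 2 1 * k 3 2 - k 3 1 * k 2 2) - k 1 1 * (k 2 0 * k 3 2 - k 3 0 * k 2 2) + k 1 2 * (k 2 0 * k 3 1 - k 3 0 * k 2 1)
      k 0 0 * deter1 - k 0 1 * deter2 + k 0 2 * deter3 - k 0 3 * deter4
    else 0  -- Python raises UnboundLocalError for other sizes; excluded by Pre_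
  pvMulinvLoop deter (PySem.List.pyRange 0 27 1)

-- ===== PORT B =====
-- Source B's det(m, n): Laplace expansion along the first row; n mirrors the Python int argument
-- (always the nonnegative row count), structural recursion on it
def pvDet : Nat → List (List Int) → Int
  | 0, _ => 0
  | 1, m => (PySem.List.pyGet? ((PySem.List.pyGet? m 0).getD []) 0).getD 0
  | n + 2, m =>
      ((PySem.List.pyRange 0 ((n : Int) + 2) 1).map (fun j =>
        (-1) ^ j.toNat * ((PySem.List.pyGet? ((PySem.List.pyGet? m 0).getD []) j).getD 0) *
          pvDet (n + 1) ((PySem.List.slice m (some 1) none).map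
            (fun row => PySem.List.slice row none (some j) ++ PySem.List.slice row (some (j + 1)) none)))).sum

-- Source B's egcd; the fuel argument only makes the same recursion structural (28 > any chain
-- starting from a first argument in [0,27))
def pvEgcd : Nat → Int → Int → Int × Int × Int
  | 0, _, b => (b, 0, 1)
  | fuel + 1, a, b =>
      if a = 0 then (b, 0, 1)
      else
        let r := pvEgcd fuel (PySem.Int.mod b a) a
        (r.1, r.2.2 - PySem.Int.floordiv b a * r.2.1, r.2.1)

-- the tail of Source B's mulinv, on the determinant value
def pvInvOf (d : Int) : Int :=
  let dd := PySem.Int.mod d 27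
  let r := pvEgcd 28 dd 27
  if r.1 = 1 then PySem.Int.mod r.2.1 27 else -1

def mulinv_alt (key : List (List Int)) : Int :=
  pvInvOf (pvDet key.length key)

-- ===== PRECONDITION & SPEC =====
-- Pre_ excludes exactly the inputs where Python A raises: sizes other than 2/3/4 (UnboundLocalError
-- on `deter`) and matrices with a row shorter than the matrix (IndexError).
def Pre_mulinv (key : List (List Int)) : Prop :=
  (key.length = 2 ∨ key.length = 3 ∨ key.length = 4) ∧ ∀ r ∈ key, key.length ≤ r.length
instance (key : List (List Int)) : Decidable (Pre_mulinv key) := by unfold Pre_mulinv; infer_instance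
def pvWitness_mulinv : List (List Int) := [[1, 2], [3, 4]]

def Spec_mulinv (key : List (List Int)) (out : Int) : Prop := out = mulinv_alt key
instance (key : List (List Int)) (out : Int) : Decidable (Spec_mulinv key out) := by unfold Spec_mulinv; infer_instance

-- ===== CLAIM (what is proved, stated in full; the proofs are below) =====
def Claim_equal_mulinv : Prop := ∀ (key : List (List Int)), Dom_mulinv key → Pre_mulinv key → Spec_mulinv key (mulinv key)

-- ===== LEMMAS AND PROOFS =====

theorem pvMod27 (d : Int) : PySem.Int.mod d 27 = d % 27 :=
  PySem.Int.mod_eq_emod_of_pos (by norm_num)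

theorem pvLoop_congr (l : List Int) (d d' : Int) (h : d % 27 = d' % 27) :
    pvMulinvLoop d l = pvMulinvLoop d' l := by
  induction l with
  | nil => rfl
  | cons i rest ih =>
    have hc : PySem.Int.mod (d * i) 27 = PySem.Int.mod (d' * i) 27 := by
      rw [pvMod27, pvMod27, Int.mul_emod, h, ← Int.mul_emod]
    simp only [pvMulinvLoop, hc, ih]

theorem pvLoop_eq_inv (d : Int) :
    pvMulinvLoop d (PySem.List.pyRange 0 27 1) = pvInvOf d := by
  have h1 : 0 ≤ d % 27 := Int.emod_nonneg _ (by norm_num)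
  have h2 : d % 27 < 27 := Int.emod_lt_of_pos _ (by norm_num)
  have hmm : d % 27 % 27 = d % 27 := Int.emod_emod_of_dvd _ dvd_rfl
  have hc := pvLoop_congr (PySem.List.pyRange 0 27 1) d (d % 27) hmm.symm
  have hi : pvInvOf d = pvInvOf (d % 27) := by
    unfold pvInvOf
    rw [pvMod27, pvMod27, hmm]
  rw [hc, hi]
  generalize d % 27 = r at h1 h2
  interval_cases r <;> decide

theorem pvFinal (dA dB : Int) (h : dA = dB) :
    pvMulinvLoop dA (PySem.List.pyRange 0 27 1) = pvInvOf dB := by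
  rw [h]; exact pvLoop_eq_inv dB

theorem pvSliceTo {α : Type} (l : List α) (i : Int) (h : 0 ≤ i) :
    PySem.List.slice l none (some i) = l.take i.toNat := by
  rcases Nat.le_total i.toNat l.length with hle | hle
  · simp [PySem.List.slice, PySem.List.clampIdx, not_lt.mpr h, Nat.min_eq_left hle]
  · simp [PySem.List.slice, PySem.List.clampIdx, not_lt.mpr h, Nat.min_eq_right hle,
      List.take_of_length_le hle]

theorem pvSliceFrom {α : Type} (l : List α) (i : Int) (h : 0 ≤ i) :
    PySem.List.slice l (some i) none = l.drop i.toNat := by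
  rcases Nat.le_total i.toNat l.length with hle | hle
  · simp [PySem.List.slice, PySem.List.clampIdx, not_lt.mpr h, Nat.min_eq_left hle]
  · simp [PySem.List.slice, PySem.List.clampIdx, not_lt.mpr h, Nat.min_eq_right hle,
      List.drop_of_length_le hle]

theorem pvCons2 {α : Type} (l : List α) (h : 2 ≤ l.length) : ∃ a b t, l = a :: b :: t := by
  rcases l with _ | ⟨a, l⟩
  · simp at h
  rcases l with _ | ⟨b, t⟩
  · simp at h
  exact ⟨a, b, t, rfl⟩

theorem pvCons3 {α : Type} (l : List α) (h : 3 ≤ l.length) : ∃ a b c t, l = a :: b :: c :: t := by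
  obtain ⟨a, b, t, rfl⟩ := pvCons2 l (by omega)
  rcases t with _ | ⟨c, t⟩
  · simp at h
  exact ⟨a, b, c, t, rfl⟩

theorem pvCons4 {α : Type} (l : List α) (h : 4 ≤ l.length) : ∃ a b c d t, l = a :: b :: c :: d :: t := by
  obtain ⟨a, b, c, t, rfl⟩ := pvCons3 l (by omega)
  rcases t with _ | ⟨d, t⟩
  · simp at h
  exact ⟨a, b, c, d, t, rfl⟩

-- ===== VERDICT (by name: the statement is the Claim_ definition above) =====
set_option maxHeartbeats 3000000 in
theorem mulinv_spec : Claim_equal_mulinv := by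
  intro key _ hPre
  obtain ⟨hs, hrow⟩ := hPre
  show mulinv key = mulinv_alt key
  rcases hs with h | h | h
  · -- size 2
    obtain ⟨r0, r1, rfl⟩ := List.length_eq_two.mp h
    obtain ⟨a0, a1, t0, rfl⟩ := pvCons2 r0 (by simpa [h] using hrow r0 (by simp))
    obtain ⟨b0, b1, t1, rfl⟩ := pvCons2 r1 (by simpa [h] using hrow r1 (by simp))
    show _ = pvInvOf _
    refine pvFinal _ _ ?_
    have hr2 : PySem.List.pyRange 0 2 1 = [0, 1] := by decide
    simp [pvKeyGet, pvDet, hr2, pvSliceTo, pvSliceFrom, PySem.List.pyGet?_of_nonneg]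
    try ring
  · -- size 3
    obtain ⟨r0, r1, r2, rfl⟩ := List.length_eq_three.mp h
    obtain ⟨a0, a1, a2, t0, rfl⟩ := pvCons3 r0 (by simpa [h] using hrow r0 (by simp))
    obtain ⟨b0, b1, b2, t1, rfl⟩ := pvCons3 r1 (by simpa [h] using hrow r1 (by simp))
    obtain ⟨c0, c1, c2, t2, rfl⟩ := pvCons3 r2 (by simpa [h] using hrow r2 (by simp))
    show _ = pvInvOf _
    refine pvFinal _ _ ?_
    have hr3 : PySem.List.pyRange 0 3 1 = [0, 1, 2] := by decide
    have hr2 : PySem.List.pyRange 0 2 1 = [0, 1] := by decide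
    simp [pvKeyGet, pvDet, hr3, hr2, pvSliceTo, pvSliceFrom, PySem.List.pyGet?_of_nonneg]
    try ring
  · -- size 4
    obtain ⟨r0, r1, r2, r3, t, rfl⟩ := pvCons4 key (by omega)
    obtain rfl : t = [] := by
      have : t.length = 0 := by simpa using h
      exact List.eq_nil_of_length_eq_zero this
    obtain ⟨a0, a1, a2, a3, t0, rfl⟩ := pvCons4 r0 (by simpa [h] using hrow r0 (by simp))
    obtain ⟨b0, b1, b2, b3, t1, rfl⟩ := pvCons4 r1 (by simpa [h] using hrow r1 (by simp))
    obtain ⟨c0, c1, c2, c3, t2, rfl⟩ := pvCons4 r2 (by simpa [h] using hrow r2 (by simp))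
    obtain ⟨d0, d1, d2, d3, t3, rfl⟩ := pvCons4 r3 (by simpa [h] using hrow r3 (by simp))
    show _ = pvInvOf _
    refine pvFinal _ _ ?_
    have hr4 : PySem.List.pyRange 0 4 1 = [0, 1, 2, 3] := by decide
    have hr3 : PySem.List.pyRange 0 3 1 = [0, 1, 2] := by decide
    have hr2 : PySem.List.pyRange 0 2 1 = [0, 1] := by decide
    simp [pvKeyGet, pvDet, hr4, hr3, hr2, pvSliceTo, pvSliceFrom, PySem.List.pyGet?_of_nonneg]
    try ring
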